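-- pv_equiv track=rewrite | github.com/zihwanpack/backjoon | 프로그래머스/1/42862. 체육복/체육복.py | solution
-- ===== SOURCE A (Python) =====
-- def solution(n, lost, reserve):
--     answer = 0
--     real_lost = sorted(set(lost) - set(reserve))
--     real_reserve = sorted(set(reserve) - set(lost))
--
--     for man in real_lost:
--         if man - 1 in real_reserve:
--             real_reserve.remove(man - 1)
--         elif man + 1 in real_reserve:
--             real_reserve.remove(man + 1)
--         else:
--             n -= 1
--     return n
-- ===== SOURCE B (Python) =====
-- def solution(n, lost, reserve):
--     real_lost = sorted(set(lost) - set(reserve))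
--     real_reserve = sorted(set(reserve) - set(lost))
--     j = 0
--     for man in real_lost:
--         while j < len(real_reserve) and real_reserve[j] < man - 1:
--             j += 1
--         if j < len(real_reserve) and (real_reserve[j] == man - 1 or real_reserve[j] == man + 1):
--             j += 1
--         else:
--             n -= 1
--     return n
-- ===== Notes on version B (the rewrite author's own statement) =====
-- stated objective: faster
-- what changed: A rescans and mutates the reserve list (membership test + list.remove) for every lost student; B replaces that with a single two-pointer merge scan over the two sorted deduplicated lists.
import Mathlib
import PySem

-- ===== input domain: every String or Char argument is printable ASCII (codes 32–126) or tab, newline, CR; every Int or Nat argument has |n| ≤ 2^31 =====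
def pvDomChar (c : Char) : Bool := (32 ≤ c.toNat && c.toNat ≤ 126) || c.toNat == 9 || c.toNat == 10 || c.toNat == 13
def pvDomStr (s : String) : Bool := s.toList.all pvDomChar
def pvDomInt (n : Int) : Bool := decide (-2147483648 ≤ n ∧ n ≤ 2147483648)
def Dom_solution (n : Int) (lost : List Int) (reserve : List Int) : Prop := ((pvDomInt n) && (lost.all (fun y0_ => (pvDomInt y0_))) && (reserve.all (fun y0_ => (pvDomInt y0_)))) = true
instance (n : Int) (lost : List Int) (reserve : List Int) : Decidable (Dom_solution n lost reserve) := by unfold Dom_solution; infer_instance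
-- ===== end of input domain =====

-- B replaces A's inner list membership test + list.remove (a rescan of the reserve list for
-- every lost student) by a single two-pointer merge scan over the two sorted deduplicated lists.

-- shared preprocessing of both Pythons: sorted(set(xs) - set(ys))
def pvSortedDiff (xs ys : List Int) : List Int :=
  PySem.List.sorted (PySem.Set.diff (PySem.Set.ofList xs) (PySem.Set.ofList ys)) (fun x => x) false

-- ===== PORT A =====
-- one iteration of A's for-loop; state = (real_reserve, n)
def aStep (st : List Int × Int) (man : Int) : List Int × Int :=
  if (man - 1) ∈ st.1 then ((PySem.List.remove? st.1 (man - 1)).getD st.1, st.2)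
  else if (man + 1) ∈ st.1 then ((PySem.List.remove? st.1 (man + 1)).getD st.1, st.2)
  else (st.1, st.2 - 1)

def solution (n : Int) (lost : List Int) (reserve : List Int) : Int :=
  (((pvSortedDiff lost reserve).foldl aStep (pvSortedDiff reserve lost, n))).2

-- ===== PORT B =====
-- the inner while loop of Source B: advance the pointer past reserves < man - 1
-- (the suffix of real_reserve from index j plays the role of the pointer j)
def skipSmall (man : Int) : List Int → List Int
  | [] => []
  | r :: rs => if r < man - 1 then skipSmall man rs else r :: rs

-- Source B's for-loop over real_lost, carrying the reserve suffix and n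
def bLoop : List Int → List Int → Int → Int
  | [], _, n => n
  | man :: L, R, n =>
    match skipSmall man R with
    | [] => bLoop L [] (n - 1)
    | r :: R' =>
      if r = man - 1 ∨ r = man + 1 then bLoop L R' n else bLoop L (r :: R') (n - 1)

def solution_alt (n : Int) (lost : List Int) (reserve : List Int) : Int :=
  bLoop (pvSortedDiff lost reserve) (pvSortedDiff reserve lost) n

-- ===== PRECONDITION & SPEC =====
def Spec_solution (n : Int) (lost : List Int) (reserve : List Int) (out : Int) : Prop := out = solution_alt n lost reserve
instance (n : Int) (lost : List Int) (reserve : List Int) (out : Int) : Decidable (Spec_solution n lost reserve out) := by unfold Spec_solution; infer_instance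

-- ===== CLAIM (what is proved, stated in full; the proofs are below) =====
def Claim_equal_solution : Prop := ∀ (n : Int) (lost : List Int) (reserve : List Int), Dom_solution n lost reserve → Spec_solution n lost reserve (solution n lost reserve)

-- ===== LEMMAS AND PROOFS =====

-- A's fold ignores a reserve element smaller than every remaining man - 1
lemma aFold_cons_small (L : List Int) (R : List Int) (n r : Int)
    (h : ∀ m ∈ L, r < m - 1) :
    (L.foldl aStep (r :: R, n)).2 = (L.foldl aStep (R, n)).2 := by
  induction L generalizing R n with
  | nil => rfl
  | cons man L ih =>
    have hr := h man (by simp)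
    have hL : ∀ m ∈ L, r < m - 1 := fun m hm => h m (by simp [hm])
    have e1 : (man - 1) ∈ r :: R ↔ (man - 1) ∈ R := by
      constructor
      · intro hx; rcases List.mem_cons.mp hx with hx | hx
        · omega
        · exact hx
      · intro hx; exact List.mem_cons.mpr (Or.inr hx)
    have e2 : (man + 1) ∈ r :: R ↔ (man + 1) ∈ R := by
      constructor
      · intro hx; rcases List.mem_cons.mp hx with hx | hx
        · omega
        · exact hx
      · intro hx; exact List.mem_cons.mpr (Or.inr hx)
    simp only [List.foldl_cons]
    by_cases hm1 : (man - 1) ∈ R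
    · have ha : aStep (r :: R, n) man = (r :: R.erase (man - 1), n) := by
        simp only [aStep, if_pos (e1.mpr hm1),
          PySem.List.remove?_cons_of_ne R (show r ≠ man - 1 by omega),
          PySem.List.remove?_eq_some_erase R _ hm1, Option.map_some, Option.getD_some]
      have hb : aStep (R, n) man = (R.erase (man - 1), n) := by
        simp only [aStep, if_pos hm1, PySem.List.remove?_eq_some_erase R _ hm1, Option.getD_some]
      rw [ha, hb]; exact ih _ _ hL
    · by_cases hm2 : (man + 1) ∈ R
      · have ha : aStep (r :: R, n) man = (r :: R.erase (man + 1), n) := by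
          simp only [aStep, if_neg (fun hx => hm1 (e1.mp hx)), if_pos (e2.mpr hm2),
            PySem.List.remove?_cons_of_ne R (show r ≠ man + 1 by omega),
            PySem.List.remove?_eq_some_erase R _ hm2, Option.map_some, Option.getD_some]
        have hb : aStep (R, n) man = (R.erase (man + 1), n) := by
          simp only [aStep, if_neg hm1, if_pos hm2,
            PySem.List.remove?_eq_some_erase R _ hm2, Option.getD_some]
        rw [ha, hb]; exact ih _ _ hL
      · have ha : aStep (r :: R, n) man = (r :: R, n - 1) := by
          simp only [aStep, if_neg (fun hx => hm1 (e1.mp hx)), if_neg (fun hx => hm2 (e2.mp hx))]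
        have hb : aStep (R, n) man = (R, n - 1) := by
          simp only [aStep, if_neg hm1, if_neg hm2]
        rw [ha, hb]; exact ih _ _ hL

lemma skipSmall_cons_lt {man r : Int} (R : List Int) (h : r < man - 1) :
    skipSmall man (r :: R) = skipSmall man R := by simp [skipSmall, h]

lemma skipSmall_cons_ge {man r : Int} (R : List Int) (h : ¬ r < man - 1) :
    skipSmall man (r :: R) = r :: R := by simp [skipSmall, h]

lemma bLoop_cons_small {man r : Int} (L R : List Int) (n : Int) (h : r < man - 1) :
    bLoop (man :: L) (r :: R) n = bLoop (man :: L) R n := by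
  simp only [bLoop, skipSmall_cons_lt R h]

-- inner induction on the reserve list, for a fixed head of the lost list
lemma main_inner (man : Int) (L : List Int)
    (hman : ∀ m ∈ L, man < m)
    (ihL : ∀ R n, R.Pairwise (· < ·) → (∀ x ∈ L, x ∉ R) →
      (L.foldl aStep (R, n)).2 = bLoop L R n) :
    ∀ R n, R.Pairwise (· < ·) → (∀ x ∈ man :: L, x ∉ R) →
      ((man :: L).foldl aStep (R, n)).2 = bLoop (man :: L) R n := by
  intro R
  induction R with
  | nil =>
    intro n _ _
    have ha : aStep (([] : List Int), n) man = ([], n - 1) := by simp [aStep]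
    simp only [List.foldl_cons, ha]
    rw [show bLoop (man :: L) [] n = bLoop L [] (n - 1) from by simp [bLoop, skipSmall]]
    exact ihL [] (n - 1) List.Pairwise.nil (by intro x hx; simp)
  | cons r R ihR =>
    intro n hR hdis
    have hRtail : R.Pairwise (· < ·) := hR.tail
    have hrR : ∀ y ∈ R, r < y := fun y hy => (List.pairwise_cons.mp hR).1 y hy
    by_cases hsmall : r < man - 1
    · rw [bLoop_cons_small L R n hsmall]
      rw [aFold_cons_small (man :: L) R n r ?_]
      · exact ihR n hRtail (fun x hx hm => hdis x hx (List.mem_cons.mpr (Or.inr hm)))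
      · intro m hm
        rcases List.mem_cons.mp hm with h | h
        · omega
        · have := hman m h; omega
    · have hrman : r ≠ man := fun h => hdis man (by simp) (by simp [h])
      have hdis' : ∀ x ∈ L, x ∉ (r :: R) := fun x hx => hdis x (by simp [hx])
      simp only [bLoop, skipSmall_cons_ge R hsmall]
      by_cases h1 : r = man - 1
      · -- borrow from the left neighbour
        subst h1
        have ha : aStep ((man - 1) :: R, n) man = (R, n) := by
          simp [aStep, PySem.List.remove?_cons_self]
        simp only [List.foldl_cons, ha]
        exact ihL R n hRtail (fun x hx hm => hdis' x hx (List.mem_cons.mpr (Or.inr hm)))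
      · by_cases h2 : r = man + 1
        · -- borrow from the right neighbour
          have hnot1 : (man - 1) ∉ r :: R := by
            intro hx
            rcases List.mem_cons.mp hx with hx | hx
            · omega
            · have := hrR _ hx; omega
          have ha : aStep (r :: R, n) man = (R, n) := by
            subst h2
            simp [aStep, hnot1, PySem.List.remove?_cons_self]
          simp only [List.foldl_cons, ha, if_pos (Or.inr h2)]
          exact ihL R n hRtail (fun x hx hm => hdis' x hx (List.mem_cons.mpr (Or.inr hm)))
        · -- no neighbour available: n decreases
          have hbig : man + 1 < r := by omega
          have hnot1 : (man - 1) ∉ r :: R := by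
            intro hx
            rcases List.mem_cons.mp hx with hx | hx
            · omega
            · have := hrR _ hx; omega
          have hnot2 : (man + 1) ∉ r :: R := by
            intro hx
            rcases List.mem_cons.mp hx with hx | hx
            · omega
            · have := hrR _ hx; omega
          have ha : aStep (r :: R, n) man = (r :: R, n - 1) := by
            simp only [aStep, if_neg hnot1, if_neg hnot2]
          simp only [List.foldl_cons, ha,
            if_neg (show ¬(r = man - 1 ∨ r = man + 1) by omega)]
          exact ihL (r :: R) (n - 1) hR hdis'

-- main invariant: on strictly sorted disjoint lists the two loops agree
lemma main_lemma (L : List Int) (R : List Int) (n : Int)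
    (hL : L.Pairwise (· < ·)) (hR : R.Pairwise (· < ·))
    (hdis : ∀ x ∈ L, x ∉ R) :
    (L.foldl aStep (R, n)).2 = bLoop L R n := by
  induction L generalizing R n with
  | nil => simp [bLoop]
  | cons man L ihL =>
    exact main_inner man L (fun m hm => (List.pairwise_cons.mp hL).1 m hm)
      (fun R' n' hR' hd' => ihL R' n' hL.tail hR' hd') R n hR hdis

lemma pvSortedDiff_pairwise (xs ys : List Int) : (pvSortedDiff xs ys).Pairwise (· < ·) := by
  have hnd : (PySem.Set.diff (PySem.Set.ofList xs) (PySem.Set.ofList ys)).Nodup :=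
    PySem.Set.nodup_diff _ _ (PySem.Set.nodup_ofList xs)
  have hperm := PySem.List.sorted_perm
    (PySem.Set.diff (PySem.Set.ofList xs) (PySem.Set.ofList ys)) (fun x => x) false
  have hnd' : (pvSortedDiff xs ys).Nodup := hperm.nodup_iff.mpr hnd
  have hle : (pvSortedDiff xs ys).Pairwise (fun a b => a ≤ b) :=
    PySem.List.sorted_pairwise _ _
  exact (hle.and hnd').imp (fun h => lt_of_le_of_ne h.1 h.2)

lemma mem_pvSortedDiff {x : Int} {xs ys : List Int} :
    x ∈ pvSortedDiff xs ys ↔ x ∈ xs ∧ x ∉ ys := by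
  unfold pvSortedDiff
  rw [PySem.List.mem_sorted _ _ _ x, PySem.Set.mem_diff _ _ x, PySem.Set.mem_ofList xs x, PySem.Set.mem_ofList ys x]

-- ===== VERDICT (by name: the statement is the Claim_ definition above) =====
theorem solution_spec : Claim_equal_solution := by
  intro n lost reserve _
  show solution n lost reserve = solution_alt n lost reserve
  unfold solution solution_alt
  exact main_lemma _ _ n (pvSortedDiff_pairwise _ _) (pvSortedDiff_pairwise _ _)
    (fun x hx hmem => (mem_pvSortedDiff.mp hmem).2 (mem_pvSortedDiff.mp hx).1)
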